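-- pv_equiv track=rewrite | github.com/AonoZan/JavaBildIT | _02_Dan/Zadaca/DisplayAPattern.py | konstruisiPrikaz
-- ===== SOURCE A (Python) =====
-- def konstruisiPrikaz(recenica, slova):
--     finalniPrikaz = "";
--
--     # obrni za svaki red od ukupno cetiri
--     # obrni za svako slovo u redu
--     for redovi in range(0, 4):
--         for kolone in range(len(recenica)):
--             # otkrij koje je trenutno slovo iz recenice
--             # i otkrij koji je prikaz trenutnog slova
--             # na osnovu biblioteke slova
--             trenutnoSlovo = recenica[kolone];
--             redSlova = slova[trenutnoSlovo][redovi];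
--
--             # dodaj prikaz trenutnog slova na finalni prikaz ali
--             # zamjeni sve 1 u prikazu sa trenutnim slovom
--             # i na kraju dodaj odvojeno
--             finalniPrikaz += redSlova.replace("1", trenutnoSlovo);
--             finalniPrikaz += " ";
--
--         # kreni novi red
--         finalniPrikaz += "\n";
--
--     return finalniPrikaz
-- ===== SOURCE B (Python) =====
-- def konstruisiPrikaz(recenica, slova):
--     # char-major: one pass over the sentence, building the four rows together
--     rows = ["", "", "", ""]
--     for ch in recenica:
--         pat = slova[ch]
--         rows = [rows[r] + pat[r].replace("1", ch) + " " for r in range(4)]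
--     return "".join(row + "\n" for row in rows)
-- ===== Notes on version B (the rewrite author's own statement) =====
-- stated objective: alternative
-- what changed: Replaces A's four row-major passes over the sentence (string concatenation into one accumulator) with a single char-major pass that grows four row buffers simultaneously, joined at the end.
import Mathlib
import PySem

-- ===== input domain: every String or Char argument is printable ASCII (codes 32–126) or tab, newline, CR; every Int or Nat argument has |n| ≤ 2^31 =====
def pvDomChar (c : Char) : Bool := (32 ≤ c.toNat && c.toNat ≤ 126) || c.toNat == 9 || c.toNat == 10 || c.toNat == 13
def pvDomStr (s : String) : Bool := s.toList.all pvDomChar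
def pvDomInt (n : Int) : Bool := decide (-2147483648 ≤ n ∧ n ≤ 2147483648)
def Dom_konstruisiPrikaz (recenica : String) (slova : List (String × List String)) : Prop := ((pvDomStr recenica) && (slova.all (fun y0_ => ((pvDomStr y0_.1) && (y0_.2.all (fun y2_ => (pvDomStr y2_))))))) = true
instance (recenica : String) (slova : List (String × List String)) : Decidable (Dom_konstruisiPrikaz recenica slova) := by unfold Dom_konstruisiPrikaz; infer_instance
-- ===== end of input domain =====

-- B makes one char-major pass growing four row buffers instead of A's four row-major passes; same output, different decomposition.

-- ===== PORT A =====
-- row-major: for each of the 4 rows, scan the whole sentence, appending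
-- each letter's pattern line (with '1' replaced by the letter) plus a space.
-- recenica[kolone] (a length-1 str in Python) is String.mk [·] of the char at
-- that index; the index is always in range (kolone ∈ range(len(recenica))),
-- so the total pyGetD is exact. slova[key][r] is first-match assoc lookup then
-- pyGetD; inputs on which Python would raise KeyError/IndexError are excluded by Pre_.
def konstruisiPrikaz (recenica : String) (slova : List (String × List String)) : String :=
  (PySem.List.pyRange 0 4).foldl (fun fin r =>
    ((PySem.List.pyRange 0 (PySem.Str.len recenica)).foldl (fun fin k =>
        let trenutnoSlovo : String := String.mk [PySem.List.pyGetD recenica.toList k ' ']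
        let redSlova := PySem.List.pyGetD ((List.lookup trenutnoSlovo slova).getD []) r ""
        (fin ++ PySem.Str.replace redSlova "1" trenutnoSlovo) ++ " ") fin) ++ "\n") ""

-- ===== PORT B =====
-- char-major: one pass over the characters, rebuilding the 4 row buffers each
-- step; the buffers are then joined, each followed by a newline.
def konstruisiPrikaz_alt (recenica : String) (slova : List (String × List String)) : String :=
  let rows := recenica.toList.foldl (fun (rows : List String) ch =>
      let t : String := String.mk [ch]
      let pat := (List.lookup t slova).getD []
      (PySem.List.pyRange 0 4).map (fun r =>
        (PySem.List.pyGetD rows r "" ++ PySem.Str.replace (PySem.List.pyGetD pat r "") "1" t) ++ " "))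
    ["", "", "", ""]
  rows.foldl (fun acc row => acc ++ row ++ "\n") ""

-- ===== PRECONDITION & SPEC =====
-- Pre_ excludes exactly the inputs on which A raises: a sentence character whose
-- 1-char string is not a key of slova (KeyError) or whose pattern has fewer than 4 rows (IndexError).
def Pre_konstruisiPrikaz (recenica : String) (slova : List (String × List String)) : Prop :=
  (recenica.toList.all (fun c =>
     match List.lookup (String.mk [c]) slova with
     | some p => 4 ≤ p.length
     | none => false)) = true
instance (recenica : String) (slova : List (String × List String)) : Decidable (Pre_konstruisiPrikaz recenica slova) := by unfold Pre_konstruisiPrikaz; infer_instance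

def pvWitness_konstruisiPrikaz : String × (List (String × List String)) :=
  ("ab", [("a", ["1", "11", "1 ", "1"]), ("b", ["b1", "1", "1", "1"])])

def Spec_konstruisiPrikaz (recenica : String) (slova : List (String × List String)) (out : String) : Prop := out = konstruisiPrikaz_alt recenica slova
instance (recenica : String) (slova : List (String × List String)) (out : String) : Decidable (Spec_konstruisiPrikaz recenica slova out) := by unfold Spec_konstruisiPrikaz; infer_instance

-- ===== CLAIM (what is proved, stated in full; the proofs are below) =====
def Claim_equal_konstruisiPrikaz : Prop := ∀ (recenica : String) (slova : List (String × List String)), Dom_konstruisiPrikaz recenica slova → Pre_konstruisiPrikaz recenica slova → Spec_konstruisiPrikaz recenica slova (konstruisiPrikaz recenica slova)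

-- ===== LEMMAS AND PROOFS =====

-- the common per-character piece appended to row r
def pvPiece (slova : List (String × List String)) (r : Int) (c : Char) : String :=
  PySem.Str.replace (PySem.List.pyGetD ((List.lookup (String.mk [c]) slova).getD []) r "") "1" (String.mk [c]) ++ " "

-- pulling the accumulator out of an append-fold
theorem pvFoldl_shift (g : Char → String) : ∀ (l : List Char) (s : String),
    l.foldl (fun a c => a ++ g c) s = s ++ l.foldl (fun a c => a ++ g c) "" := by
  intro l
  induction l with
  | nil => intro s; simp
  | cons c l ih =>
    intro s
    simp only [List.foldl_cons]
    rw [ih (s ++ g c), ih ("" ++ g c)]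
    simp [String.append_assoc]

-- A's inner loop builds row r
theorem pvRowA (recenica : String) (slova : List (String × List String)) (r : Int) (fin : String) :
    (PySem.List.pyRange 0 (PySem.Str.len recenica)).foldl (fun fin k =>
        (fin ++ PySem.Str.replace (PySem.List.pyGetD ((List.lookup (String.mk [PySem.List.pyGetD recenica.toList k ' ']) slova).getD []) r "") "1" (String.mk [PySem.List.pyGetD recenica.toList k ' '])) ++ " ") fin
    = fin ++ recenica.toList.foldl (fun a c => a ++ pvPiece slova r c) "" := by
  have hlen : PySem.Str.len recenica = PySem.List.len recenica.toList := by
    simp [PySem.Str.len, PySem.List.len]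
  rw [hlen]
  have h1 := PySem.List.foldl_pyRange_zero_pyGetD recenica.toList ' '
      (fun a c => a ++ pvPiece slova r c) fin
  simp only [pvPiece] at h1 ⊢
  simp only [String.append_assoc]
  rw [h1]
  exact pvFoldl_shift _ recenica.toList fin

-- B's pass keeps the four rows as independent append-folds
theorem pvRowsB (slova : List (String × List String)) : ∀ (l : List Char) (a b c d : String),
    l.foldl (fun (rows : List String) ch =>
      (PySem.List.pyRange 0 4).map (fun r =>
        (PySem.List.pyGetD rows r "" ++ PySem.Str.replace (PySem.List.pyGetD ((List.lookup (String.mk [ch]) slova).getD []) r "") "1" (String.mk [ch])) ++ " ")) [a, b, c, d]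
    = [l.foldl (fun s ch => s ++ pvPiece slova 0 ch) a,
       l.foldl (fun s ch => s ++ pvPiece slova 1 ch) b,
       l.foldl (fun s ch => s ++ pvPiece slova 2 ch) c,
       l.foldl (fun s ch => s ++ pvPiece slova 3 ch) d] := by
  intro l
  induction l with
  | nil => intro a b c d; simp
  | cons ch l ih =>
    intro a b c d
    simp only [List.foldl_cons]
    have hstep : (PySem.List.pyRange 0 4).map (fun r =>
        (PySem.List.pyGetD [a, b, c, d] r "" ++ PySem.Str.replace (PySem.List.pyGetD ((List.lookup (String.mk [ch]) slova).getD []) r "") "1" (String.mk [ch])) ++ " ")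
        = [a ++ pvPiece slova 0 ch, b ++ pvPiece slova 1 ch, c ++ pvPiece slova 2 ch, d ++ pvPiece slova 3 ch] := by
      rw [show (PySem.List.pyRange 0 4) = [0, 1, 2, 3] from by decide]
      simp [pvPiece, PySem.List.pyGetD, PySem.List.pyGet?, PySem.List.pyIdx?, String.append_assoc]
    rw [hstep, ih]

-- ===== VERDICT (by name: the statement is the Claim_ definition above) =====
theorem konstruisiPrikaz_spec : Claim_equal_konstruisiPrikaz := by
  intro recenica slova _ _
  unfold Spec_konstruisiPrikaz konstruisiPrikaz konstruisiPrikaz_alt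
  rw [pvRowsB slova recenica.toList "" "" "" ""]
  rw [show (PySem.List.pyRange 0 4) = [0, 1, 2, 3] from by decide]
  simp only [List.foldl_cons, List.foldl_nil]
  rw [pvRowA, pvRowA, pvRowA, pvRowA]
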